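-- pv_equiv track=rewrite | github.com/GorazdVeselic/gv_smart_home | custom_components/gv_smart_home/helpers/energy.py | get_base_block
-- ===== SOURCE A (Python) =====
-- def get_base_block(hour: int) -> int:
--     """
--     Return the base hourly block for a given hour of the day.
--
--     Block mapping:
--       00–05 -> 3
--       06    -> 2
--       07–13 -> 1
--       14–15 -> 2
--       16–19 -> 1
--       20–21 -> 2
--       22–23 -> 3
--     """
--     BLOCKS = [
--         ((0, 5), 3),
--         ((6, 6), 2),
--         ((7, 13), 1),
--         ((14, 15), 2),
--         ((16, 19), 1),
--         ((20, 21), 2),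
--         ((22, 23), 3),
--     ]
--
--     for (start, end), block in BLOCKS:
--         if start <= hour <= end:
--             return block
--
--     raise ValueError(f"Invalid hour: {hour}")
-- ===== SOURCE B (Python) =====
-- _BLOCK_TABLE = {
--     0: 3, 1: 3, 2: 3, 3: 3, 4: 3, 5: 3,
--     6: 2,
--     7: 1, 8: 1, 9: 1, 10: 1, 11: 1, 12: 1, 13: 1,
--     14: 2, 15: 2,
--     16: 1, 17: 1, 18: 1, 19: 1,
--     20: 2, 21: 2,
--     22: 3, 23: 3,
-- }
--
-- def get_base_block(hour: int) -> int:
--     if hour not in _BLOCK_TABLE: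
--         raise ValueError(f"Invalid hour: {hour}")
--     return _BLOCK_TABLE[hour]
-- ===== Notes on version B (the rewrite author's own statement) =====
-- stated objective: simpler
-- what changed: Replaces the 7-range scanning loop with a precomputed 24-entry hour-to-block dict and a single membership check + O(1) lookup.
import Mathlib
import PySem

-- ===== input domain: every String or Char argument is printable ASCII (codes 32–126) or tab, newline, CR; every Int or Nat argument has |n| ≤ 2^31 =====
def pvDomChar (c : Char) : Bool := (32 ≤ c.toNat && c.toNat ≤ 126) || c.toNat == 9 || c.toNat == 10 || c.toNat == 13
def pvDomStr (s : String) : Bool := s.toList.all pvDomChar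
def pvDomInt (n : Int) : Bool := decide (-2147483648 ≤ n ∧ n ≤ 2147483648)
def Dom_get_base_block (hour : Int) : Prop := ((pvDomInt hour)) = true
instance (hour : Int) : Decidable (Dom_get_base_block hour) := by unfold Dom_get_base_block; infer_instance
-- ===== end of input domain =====

-- B replaces A's range-scan with a precomputed 24-entry table lookup; objective: simpler.
-- On 0 ≤ hour ≤ 23 both return normally; outside, both Pythons raise ValueError (excluded by Pre_).

-- ===== PORT A =====
-- the BLOCKS list of A, literally
def pvBlocksA : List ((Int × Int) × Int) :=
  [((0, 5), 3), ((6, 6), 2), ((7, 13), 1), ((14, 15), 2), ((16, 19), 1), ((20, 21), 2), ((22, 23), 3)]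

-- the for-loop of A: scan for the first range containing hour; none = ValueError
def pvScanA (hour : Int) : List ((Int × Int) × Int) → Option Int
  | [] => none
  | ((s, e), b) :: rest => if s ≤ hour ∧ hour ≤ e then some b else pvScanA hour rest

def get_base_block (hour : Int) : Int := (pvScanA hour pvBlocksA).getD 0  -- getD 0 unreachable under Pre_

-- ===== PORT B =====
-- the dict literal of Source B as a PySem.Dict
def pvBlockTable : PySem.Dict Int Int := PySem.Dict.ofList
  [(0, 3), (1, 3), (2, 3), (3, 3), (4, 3), (5, 3), (6, 2),
   (7, 1), (8, 1), (9, 1), (10, 1), (11, 1), (12, 1), (13, 1),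
   (14, 2), (15, 2), (16, 1), (17, 1), (18, 1), (19, 1),
   (20, 2), (21, 2), (22, 3), (23, 3)]

def get_base_block_alt (hour : Int) : Int :=
  (PySem.Dict.get? pvBlockTable hour).getD 0  -- none = ValueError branch, unreachable under Pre_

-- ===== PRECONDITION & SPEC =====
-- Pre_ excludes exactly the inputs where A (and B) raise ValueError: hours outside 0..23.
def Pre_get_base_block (hour : Int) : Prop := 0 ≤ hour ∧ hour ≤ 23
instance (hour : Int) : Decidable (Pre_get_base_block hour) := by unfold Pre_get_base_block; infer_instance

def pvWitness_get_base_block : Int := (7)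

def Spec_get_base_block (hour : Int) (out : Int) : Prop := out = get_base_block_alt hour
instance (hour : Int) (out : Int) : Decidable (Spec_get_base_block hour out) := by unfold Spec_get_base_block; infer_instance

-- ===== CLAIM (what is proved, stated in full; the proofs are below) =====
def Claim_equal_get_base_block : Prop := ∀ (hour : Int), Dom_get_base_block hour → Pre_get_base_block hour → Spec_get_base_block hour (get_base_block hour)

-- ===== LEMMAS AND PROOFS =====

-- ===== VERDICT (by name: the statement is the Claim_ definition above) =====
theorem get_base_block_spec : Claim_equal_get_base_block := by
  intro hour _ hpre
  obtain ⟨h0, h23⟩ := hpre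
  unfold Spec_get_base_block
  interval_cases hour <;>
    simp [get_base_block, get_base_block_alt, pvScanA, pvBlocksA, pvBlockTable, PySem.Dict.get?, PySem.Dict.ofList, PySem.Dict.update, PySem.Dict.insert, PySem.Dict.empty, PySem.Dict.items, PySem.Dict.contains]
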